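-- pv_equiv track=rewrite | github.com/Big-Gay-UFOs/ShadowScope | backend/services/review_contract.py | review_completeness_counts
-- ===== SOURCE A (Python) =====
-- from typing import Any, Optional
--
-- def review_completeness_counts(rows: list[dict[str, Any]]) -> dict[str, int]:
--     fields = (
--         "has_core_identifiers",
--         "has_agency_target",
--         "has_vendor_context",
--         "has_classification_context",
--         "has_foia_handles",
--     )
--     return {
--         field: sum(1 for row in rows if bool(row.get(field)))
--         for field in fields
--     }
-- ===== SOURCE B (Python) =====
-- def review_completeness_counts(rows):
--     n_core = 0
--     n_agency = 0
--     n_vendor = 0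
--     n_class = 0
--     n_foia = 0
--     for row in rows:
--         if row.get("has_core_identifiers"):
--             n_core += 1
--         if row.get("has_agency_target"):
--             n_agency += 1
--         if row.get("has_vendor_context"):
--             n_vendor += 1
--         if row.get("has_classification_context"):
--             n_class += 1
--         if row.get("has_foia_handles"):
--             n_foia += 1
--     return {
--         "has_core_identifiers": n_core,
--         "has_agency_target": n_agency,
--         "has_vendor_context": n_vendor,
--         "has_classification_context": n_class,
--         "has_foia_handles": n_foia,
--     }
-- ===== Notes on version B (the rewrite author's own statement) =====
-- stated objective: alternative
-- what changed: Replaced the dict comprehension that scans rows once per field (five traversals) with a single pass over rows maintaining five scalar counters.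
import Mathlib
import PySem

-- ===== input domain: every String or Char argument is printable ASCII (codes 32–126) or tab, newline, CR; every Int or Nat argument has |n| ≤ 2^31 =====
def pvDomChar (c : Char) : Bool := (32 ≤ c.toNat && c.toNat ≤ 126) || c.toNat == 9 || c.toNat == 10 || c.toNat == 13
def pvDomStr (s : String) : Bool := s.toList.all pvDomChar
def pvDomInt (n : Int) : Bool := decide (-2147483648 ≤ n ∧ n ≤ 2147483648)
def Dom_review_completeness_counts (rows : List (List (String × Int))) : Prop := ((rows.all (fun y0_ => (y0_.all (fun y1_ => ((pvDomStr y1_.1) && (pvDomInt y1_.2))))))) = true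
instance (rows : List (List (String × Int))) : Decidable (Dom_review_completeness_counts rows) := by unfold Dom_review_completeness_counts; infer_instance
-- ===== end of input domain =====

-- B replaces A's five per-field scans of rows (dict comprehension) with one pass over rows
-- maintaining five scalar counters; objective: alternative decomposition (same cost).


-- ===== PORT A =====
-- bool(row.get(field)): missing key or value 0 is falsy, any other int truthy (exact)
def pvTruthy (row : List (String × Int)) (f : String) : Bool :=
  ((PySem.Dict.mk row).get? f).getD 0 != 0

def pvFields : List String :=
  ["has_core_identifiers", "has_agency_target", "has_vendor_context",
   "has_classification_context", "has_foia_handles"]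

-- dict comprehension: for each field (in order), sum(1 for row in rows if bool(row.get(field)))
def review_completeness_counts (rows : List (List (String × Int))) : List (String × Int) :=
  (pvFields.foldl
    (fun d f =>
      d.insert f (rows.foldl (fun acc row => if pvTruthy row f then acc + 1 else acc) (0 : Int)))
    PySem.Dict.empty).items

-- ===== PORT B =====
-- single pass over rows updating five scalar counters (state = nested 5-tuple)
def review_completeness_counts_alt (rows : List (List (String × Int))) : List (String × Int) :=
  let s : Int × Int × Int × Int × Int :=
    rows.foldl
      (fun s row =>
        (if pvTruthy row "has_core_identifiers" then s.1 + 1 else s.1,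
         if pvTruthy row "has_agency_target" then s.2.1 + 1 else s.2.1,
         if pvTruthy row "has_vendor_context" then s.2.2.1 + 1 else s.2.2.1,
         if pvTruthy row "has_classification_context" then s.2.2.2.1 + 1 else s.2.2.2.1,
         if pvTruthy row "has_foia_handles" then s.2.2.2.2 + 1 else s.2.2.2.2))
      (0, 0, 0, 0, 0)
  [("has_core_identifiers", s.1), ("has_agency_target", s.2.1),
   ("has_vendor_context", s.2.2.1), ("has_classification_context", s.2.2.2.1),
   ("has_foia_handles", s.2.2.2.2)]

-- ===== PRECONDITION & SPEC =====
def Spec_review_completeness_counts (rows : List (List (String × Int))) (out : List (String × Int)) : Prop := out = review_completeness_counts_alt rows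
instance (rows : List (List (String × Int))) (out : List (String × Int)) : Decidable (Spec_review_completeness_counts rows out) := by unfold Spec_review_completeness_counts; infer_instance

-- ===== CLAIM (what is proved, stated in full; the proofs are below) =====
def Claim_equal_review_completeness_counts : Prop := ∀ (rows : List (List (String × Int))), Dom_review_completeness_counts rows → Spec_review_completeness_counts rows (review_completeness_counts rows)

-- ===== LEMMAS AND PROOFS =====
theorem tuple_fold_split (rows : List (List (String × Int))) (a b c d e : Int) :
    rows.foldl
      (fun s row =>
        ((if pvTruthy row "has_core_identifiers" then s.1 + 1 else s.1,
         if pvTruthy row "has_agency_target" then s.2.1 + 1 else s.2.1,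
         if pvTruthy row "has_vendor_context" then s.2.2.1 + 1 else s.2.2.1,
         if pvTruthy row "has_classification_context" then s.2.2.2.1 + 1 else s.2.2.2.1,
         if pvTruthy row "has_foia_handles" then s.2.2.2.2 + 1 else s.2.2.2.2) :
          Int × Int × Int × Int × Int))
      (a, b, c, d, e) =
    (rows.foldl (fun acc row => if pvTruthy row "has_core_identifiers" then acc + 1 else acc) a,
     rows.foldl (fun acc row => if pvTruthy row "has_agency_target" then acc + 1 else acc) b,
     rows.foldl (fun acc row => if pvTruthy row "has_vendor_context" then acc + 1 else acc) c,
     rows.foldl (fun acc row => if pvTruthy row "has_classification_context" then acc + 1 else acc) d,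
     rows.foldl (fun acc row => if pvTruthy row "has_foia_handles" then acc + 1 else acc) e) := by
  induction rows generalizing a b c d e with
  | nil => rfl
  | cons r rs ih => simp [List.foldl, ih]

-- ===== VERDICT (by name: the statement is the Claim_ definition above) =====
theorem review_completeness_counts_spec : Claim_equal_review_completeness_counts := by
  intro rows _
  unfold Spec_review_completeness_counts review_completeness_counts review_completeness_counts_alt
  simp only [tuple_fold_split]
  rfl
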